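-- pv_equiv track=rewrite | github.com/ShlyapaEx/python-labs | lab 1/task 2.py | get_min_thing
-- ===== SOURCE A (Python) =====
-- from itertools import groupby
--
-- def get_min_thing(numbers: list[int]):
--     if len(numbers) == 0:
--         return 0
--     if len(numbers) == 1:
--         return numbers[0]
--
--     min_number = min(numbers)
--     operations_count = min_number
--
--     for index, num in enumerate(numbers):
--         numbers[index] -= min_number
--
--     numbers = [list(group) for key, group in
--                groupby(numbers, key=lambda x:x != 0) if key]
--
--     for num_list in numbers:
--         operations_count += get_min_thing(num_list)
--
--     return operations_count
-- ===== SOURCE B (Python) =====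
-- def get_min_thing(numbers: list[int]):
--     if not numbers:
--         return 0
--     total = numbers[0]
--     prev = numbers[0]
--     for cur in numbers[1:]:
--         if cur > prev:
--             total += cur - prev
--         prev = cur
--     return total
-- ===== Notes on version B (the rewrite author's own statement) =====
-- stated objective: faster
-- what changed: Replaced the recursive subtract-the-minimum-and-split-on-zeros scheme by a single left-to-right pass summing numbers[0] plus the positive differences between consecutive elements.
import Mathlib
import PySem

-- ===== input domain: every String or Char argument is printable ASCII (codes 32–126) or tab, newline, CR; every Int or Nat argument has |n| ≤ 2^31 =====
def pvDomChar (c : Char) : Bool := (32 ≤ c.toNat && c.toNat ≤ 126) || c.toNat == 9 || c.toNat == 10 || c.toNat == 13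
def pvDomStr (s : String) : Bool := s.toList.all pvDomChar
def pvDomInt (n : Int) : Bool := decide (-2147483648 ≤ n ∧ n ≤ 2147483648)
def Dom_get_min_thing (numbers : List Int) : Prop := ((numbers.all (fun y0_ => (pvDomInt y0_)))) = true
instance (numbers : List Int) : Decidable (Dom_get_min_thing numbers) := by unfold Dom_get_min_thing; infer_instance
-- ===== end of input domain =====

-- B replaces A's recursive subtract-the-minimum-and-split-at-zeros scheme by one linear pass
-- (numbers[0] + positive consecutive differences).  Note: Python A mutates its argument in
-- place (subtracts the minimum from every cell); the equivalence proved is about the RETURN value.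

-- ===== PORT A =====

-- hand-ported: `[list(g) for k, g in groupby(numbers, key=lambda x: x != 0) if k]`
-- yields exactly the maximal runs of nonzero elements, which is what this computes (exact).
def pvGroupsNZ : List Int → List (List Int)
  | [] => []
  | x :: xs =>
    if x = 0 then pvGroupsNZ xs
    else (x :: xs.takeWhile (fun y => y != 0)) :: pvGroupsNZ (xs.dropWhile (fun y => y != 0))
termination_by l => l.length
decreasing_by
  · simp
  · have := List.length_dropWhile_le (fun y => y != 0) xs
    simp; omega

-- termination facts for the recursive call of A (cited in decreasing_by below)
theorem pvTakeWhile_lt (xs : List Int) (h : (0:Int) ∈ xs) :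
    (xs.takeWhile (fun y => y != 0)).length < xs.length := by
  induction xs with
  | nil => cases h
  | cons x t ih =>
    by_cases hx : x = 0
    · subst hx; simp
    · rw [List.takeWhile_cons, if_pos (by simp [hx])]
      have h0 : (0:Int) ∈ t := by
        cases h with
        | head => exact absurd rfl hx
        | tail _ h => exact h
      have := ih h0
      simp; omega

theorem pvZero_mem_dropWhile (xs : List Int) (h : (0:Int) ∈ xs) :
    (0:Int) ∈ xs.dropWhile (fun y => y != 0) := by
  induction xs with
  | nil => cases h
  | cons x t ih =>
    by_cases hx : x = 0
    · subst hx; simp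
    · rw [List.dropWhile_cons, if_pos (by simp [hx])]
      cases h with
      | head => exact absurd rfl hx
      | tail _ h => exact ih h

theorem pvGroupsNZ_length_le (l : List Int) :
    ∀ g ∈ pvGroupsNZ l, g.length ≤ l.length := by
  induction l using pvGroupsNZ.induct with
  | case1 => intro g hg; simp [pvGroupsNZ] at hg
  | case2 xs ih =>
    intro g hg
    simp only [pvGroupsNZ] at hg
    have := ih g hg
    simp; omega
  | case3 x xs hx ih =>
    intro g hg
    simp only [pvGroupsNZ, if_neg hx] at hg
    cases hg with
    | head =>
      have := (List.takeWhile_prefix (l := xs) (fun y => y != 0)).length_le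
      simp; omega
    | tail _ hg =>
      have h1 := ih g hg
      have h2 := List.length_dropWhile_le (fun y => y != 0) xs
      simp; omega

theorem pvGroupsNZ_length_lt (l : List Int) (h0 : (0:Int) ∈ l) :
    ∀ g ∈ pvGroupsNZ l, g.length < l.length := by
  induction l using pvGroupsNZ.induct with
  | case1 => intro g hg; simp [pvGroupsNZ] at hg
  | case2 xs ih =>
    intro g hg
    simp only [pvGroupsNZ] at hg
    have := pvGroupsNZ_length_le xs g hg
    simp; omega
  | case3 x xs hx ih =>
    intro g hg
    have h0' : (0:Int) ∈ xs := by
      cases h0 with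
      | head => exact absurd rfl hx
      | tail _ h => exact h
    simp only [pvGroupsNZ, if_neg hx] at hg
    cases hg with
    | head =>
      have := pvTakeWhile_lt xs h0'
      simp; omega
    | tail _ hg =>
      have h0d := pvZero_mem_dropWhile xs h0'
      have h1 := ih h0d g hg
      have h2 := List.length_dropWhile_le (fun y => y != 0) xs
      simp; omega

def get_min_thing (numbers : List Int) : Int :=
  if numbers.length = 0 then 0
  else if numbers.length = 1 then numbers.headI
  else
    match hm : PySem.List.min? numbers (fun x => x) with
    | none => 0   -- unreachable: numbers ≠ [] here (totality guard only)
    | some m =>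
      (pvGroupsNZ (numbers.map (fun x => x - m))).attach.foldl
        (fun acc g => acc + get_min_thing g.1) m
termination_by numbers.length
decreasing_by
  have hmem : m ∈ numbers := PySem.List.min?_mem hm
  have h0 : (0:Int) ∈ numbers.map (fun x => x - m) :=
    List.mem_map.mpr ⟨m, hmem, by ring⟩
  have := pvGroupsNZ_length_lt (numbers.map (fun x => x - m)) h0 g.1 g.2
  simpa using this

-- ===== PORT B =====

def pvAltGo (prev : Int) : List Int → Int
  | [] => 0
  | y :: ys => (if prev < y then y - prev else 0) + pvAltGo y ys

def get_min_thing_alt (numbers : List Int) : Int :=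
  match numbers with
  | [] => 0
  | x :: rest => x + pvAltGo x rest

-- ===== PRECONDITION & SPEC =====
def Spec_get_min_thing (numbers : List Int) (out : Int) : Prop := out = get_min_thing_alt numbers
instance (numbers : List Int) (out : Int) : Decidable (Spec_get_min_thing numbers out) := by unfold Spec_get_min_thing; infer_instance

-- ===== CLAIM (what is proved, stated in full; the proofs are below) =====
def Claim_equal_get_min_thing : Prop := ∀ (numbers : List Int), Dom_get_min_thing numbers → Spec_get_min_thing numbers (get_min_thing numbers)

-- ===== LEMMAS AND PROOFS =====

-- subtracting a constant from every element leaves the consecutive differences unchanged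
theorem pvAltGo_shift (rest : List Int) (m : Int) : ∀ (prev : Int),
    pvAltGo (prev - m) (rest.map (fun x => x - m)) = pvAltGo prev rest := by
  induction rest with
  | nil => intro prev; rfl
  | cons y ys ih =>
    intro prev
    simp only [List.map, pvAltGo, ih y]
    by_cases h : prev < y
    · rw [if_pos h, if_pos (by omega)]; ring_nf
    · rw [if_neg h, if_neg (by omega)]

theorem pvAltGo_append (t d : List Int) : ∀ (prev : Int),
    pvAltGo prev (t ++ d) = pvAltGo prev t + pvAltGo (t.getLastD prev) d := by
  induction t with
  | nil => intro prev; simp [pvAltGo]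
  | cons x t ih =>
    intro prev
    simp only [List.cons_append, pvAltGo, ih x, List.getLastD_cons]
    ring

-- starting pvAltGo at any nonnegative prev agrees with starting at 0 when the list is
-- empty or begins with 0
theorem pvAltGo_zero_head (d : List Int) (p : Int) (hp : 0 ≤ p)
    (hd : d = [] ∨ ∃ d', d = 0 :: d') : pvAltGo p d = pvAltGo 0 d := by
  rcases hd with h | ⟨d', h⟩ <;> subst h
  · rfl
  · simp only [pvAltGo]
    rw [if_neg (by omega), if_neg (by omega)]

theorem pvGetLastD_nonneg (t : List Int) (ht : ∀ y ∈ t, 0 ≤ y) :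
    ∀ (p : Int), 0 ≤ p → 0 ≤ t.getLastD p := by
  induction t with
  | nil => intro p hp; exact hp
  | cons x t ih =>
    intro p hp
    rw [List.getLastD_cons]
    exact ih (fun y hy => ht y (List.mem_cons_of_mem _ hy)) x (ht x (List.mem_cons_self ..))

theorem pvDropWhile_shape (xs : List Int) :
    xs.dropWhile (fun y => y != 0) = [] ∨
    ∃ d', xs.dropWhile (fun y => y != 0) = 0 :: d' := by
  induction xs with
  | nil => exact Or.inl rfl
  | cons x t ih =>
    by_cases hx : x = 0
    · subst hx; exact Or.inr ⟨t, by simp⟩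
    · rw [List.dropWhile_cons, if_pos (by simp [hx])]
      exact ih

-- key lemma: on a nonnegative list, the per-group values of B's formula sum to pvAltGo 0
theorem pvGroups_sum (l : List Int) (hn : ∀ y ∈ l, 0 ≤ y) :
    ((pvGroupsNZ l).map get_min_thing_alt).sum = pvAltGo 0 l := by
  induction l using pvGroupsNZ.induct with
  | case1 => simp [pvGroupsNZ, pvAltGo]
  | case2 xs ih =>
    rw [show pvGroupsNZ (0 :: xs) = pvGroupsNZ xs from by simp [pvGroupsNZ]]
    have := ih (fun y hy => hn y (List.mem_cons_of_mem _ hy))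
    rw [this]
    simp [pvAltGo]
  | case3 x xs hx ih =>
    rw [pvGroupsNZ, if_neg hx]
    have hxpos : 0 < x := by
      have := hn x (List.mem_cons_self ..)
      omega
    have hxs : xs.takeWhile (fun y => y != 0) ++ xs.dropWhile (fun y => y != 0) = xs :=
      List.takeWhile_append_dropWhile ..
    have hnxs : ∀ y ∈ xs, 0 ≤ y := fun y hy => hn y (List.mem_cons_of_mem _ hy)
    have hnd : ∀ y ∈ xs.dropWhile (fun y => y != 0), 0 ≤ y :=
      fun y hy => hnxs y (by rw [← hxs]; exact List.mem_append_right _ hy)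
    have hnt : ∀ y ∈ xs.takeWhile (fun y => y != 0), 0 ≤ y :=
      fun y hy => hnxs y (by rw [← hxs]; exact List.mem_append_left _ hy)
    have hsum := ih hnd
    have hlast : 0 ≤ (xs.takeWhile (fun y => y != 0)).getLastD x :=
      pvGetLastD_nonneg _ hnt x (le_of_lt hxpos)
    simp only [List.map, List.sum_cons, hsum, get_min_thing_alt]
    conv_rhs => rw [pvAltGo, ← hxs, pvAltGo_append,
      pvAltGo_zero_head _ _ hlast (pvDropWhile_shape xs)]
    rw [if_pos (by omega)]
    ring

-- turn A's foldl over the attached group list into m + a sum over the groups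
theorem pvFoldl_attach_sum (l : List (List Int)) (a : Int) :
    l.attach.foldl (fun acc g => acc + get_min_thing g.1) a
      = a + (l.map get_min_thing).sum := by
  rw [PySem.List.foldl_add]
  congr 1
  simp

theorem pvAB (numbers : List Int) : get_min_thing numbers = get_min_thing_alt numbers := by
  induction numbers using get_min_thing.induct with
  | case1 l h0 =>
    have : l = [] := List.length_eq_zero_iff.mp h0
    subst this
    simp [get_min_thing, get_min_thing_alt]
  | case2 l h0 h1 =>
    obtain ⟨a, ha⟩ := List.length_eq_one_iff.mp h1
    subst ha
    simp [get_min_thing, get_min_thing_alt, pvAltGo]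
  | case3 l h0 h1 hm =>
    have hl : l = [] := (PySem.List.min?_eq_none_iff _ _).mp hm
    subst hl
    exact absurd rfl h0
  | case4 l h0 h1 m hm ih =>
    have hmem : m ∈ l := PySem.List.min?_mem hm
    have hmin : ∀ y ∈ l, m ≤ y := PySem.List.min?_isMin hm
    rw [get_min_thing, if_neg h0, if_neg h1]
    split
    next hnone => rw [hm] at hnone; cases hnone
    next m' hm' =>
    rw [hm] at hm'
    obtain rfl : m = m' := Option.some.inj hm'
    rw [pvFoldl_attach_sum]
    have hmap : (pvGroupsNZ (l.map (fun x => x - m))).map get_min_thing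
        = (pvGroupsNZ (l.map (fun x => x - m))).map get_min_thing_alt := by
      apply List.map_congr_left
      intro g hg
      exact ih ⟨g, hg⟩
    rw [hmap]
    have hnn : ∀ y ∈ l.map (fun x => x - m), 0 ≤ y := by
      intro y hy
      obtain ⟨z, hz, rfl⟩ := List.mem_map.mp hy
      have := hmin z hz; omega
    rw [pvGroups_sum _ hnn]
    -- l is nonempty: peel off its head and use the shift lemma
    have hne : l ≠ [] := fun h => h0 (by simp [h])
    obtain ⟨x, rest, rfl⟩ := List.exists_cons_of_ne_nil hne
    have hx : m ≤ x := hmin x (List.mem_cons_self ..)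
    simp only [List.map, pvAltGo, get_min_thing_alt]
    rw [pvAltGo_shift rest m x]
    split_ifs <;> omega

-- ===== VERDICT (by name: the statement is the Claim_ definition above) =====
theorem get_min_thing_spec : Claim_equal_get_min_thing := by
  intro numbers _
  unfold Spec_get_min_thing
  exact pvAB numbers
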